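-- pv_equiv track=rewrite | github.com/Lukman-01/Coderbyte-Solutions-In-Python | Arrays/Element_Merger.py | ElementMerger
-- ===== SOURCE A (Python) =====
-- def ElementMerger(arr):
--   new_arr = arr.copy()
--   while len(new_arr) > 1:
--     temp = []
--     for i in range(1, len(new_arr)):
--       diff = abs(new_arr[i] - new_arr[i-1])
--       temp.append(diff)
--     new_arr = temp.copy()
--   return new_arr[0]
-- ===== SOURCE B (Python) =====
-- def ElementMerger(arr):
--     # Single right-to-left pass over the input, maintaining one COLUMN of the
--     # difference triangle: after consuming suffix arr[i:], col[d] holds the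
--     # level-d value at position i (col[0] = arr[i]).  No level-by-level
--     # reduction of the whole array ever happens; the answer is the deepest
--     # entry of the final column.  col[len(arr)-1] == col[-1] raises
--     # IndexError on empty input, like A.
--     col = []
--     for x in reversed(arr):
--         new = [x]
--         for d in range(1, len(col) + 1):
--             new.append(abs(col[d - 1] - new[d - 1]))
--         col = new
--     return col[len(arr) - 1]
-- ===== Notes on version B (the rewrite author's own statement) =====
-- stated objective: alternative
-- what changed: Instead of repeatedly reducing the whole array level by level until one element remains, B makes a single right-to-left pass over the input, maintaining one column of the difference triangle (col[d] = level-d value at the current position) and returns the deepest entry of the final column; no intermediate reduced arrays are ever built.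
import Mathlib
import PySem

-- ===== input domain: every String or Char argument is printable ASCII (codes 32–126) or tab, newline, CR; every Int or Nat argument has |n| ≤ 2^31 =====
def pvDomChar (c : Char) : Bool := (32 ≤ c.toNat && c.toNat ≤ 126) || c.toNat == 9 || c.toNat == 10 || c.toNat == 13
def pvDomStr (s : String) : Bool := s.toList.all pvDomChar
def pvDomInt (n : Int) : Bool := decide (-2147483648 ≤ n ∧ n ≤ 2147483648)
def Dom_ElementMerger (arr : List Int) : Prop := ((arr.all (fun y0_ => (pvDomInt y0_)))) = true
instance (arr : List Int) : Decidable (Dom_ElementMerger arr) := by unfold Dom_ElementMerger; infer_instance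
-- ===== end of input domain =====

-- B replaces A's level-by-level reduction of the whole array with a single
-- right-to-left pass maintaining one column of the difference triangle
-- (alternative decomposition, same asymptotic cost); neither mutates its argument.

-- ===== PORT A =====
-- one pass of A's inner for-loop:
-- temp = []; for i in range(1, len(new_arr)): temp.append(abs(new_arr[i] - new_arr[i-1]))
def pvStepA (new_arr : List Int) : List Int :=
  (PySem.List.pyRange 1 (new_arr.length : Int) 1).foldl
    (fun temp i =>
      temp ++ [|PySem.List.pyGetD new_arr i 0 - PySem.List.pyGetD new_arr (i - 1) 0|]) []

-- termination fact for the while loop (cited by pvLoopA's decreasing_by)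
theorem length_pvStepA (xs : List Int) : (pvStepA xs).length = xs.length - 1 := by
  unfold pvStepA
  rw [PySem.List.foldl_append_singleton_eq_map]
  simp [PySem.List.length_pyRange_one]

-- A's while loop
def pvLoopA (new_arr : List Int) : List Int :=
  if 1 < new_arr.length then pvLoopA (pvStepA new_arr) else new_arr
termination_by new_arr.length
decreasing_by simp [length_pvStepA]; omega

def ElementMerger (arr : List Int) : Int :=
  -- new_arr = arr.copy(); while …; return new_arr[0]  (index 0 valid under Pre_)
  PySem.List.pyGetD (pvLoopA arr) 0 0

-- ===== PORT B =====
def ElementMerger_alt (arr : List Int) : Int :=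
  -- col = []
  -- for x in reversed(arr):
  --   new = [x]
  --   for d in range(1, len(col) + 1): new.append(abs(col[d-1] - new[d-1]))
  --   col = new
  -- return col[len(arr) - 1]   (index valid under Pre_)
  PySem.List.pyGetD
    (arr.reverse.foldl
      (fun col x =>
        (PySem.List.pyRange 1 ((col.length : Int) + 1) 1).foldl
          (fun new d =>
            new ++ [|PySem.List.pyGetD col (d - 1) 0 - PySem.List.pyGetD new (d - 1) 0|])
          [x])
      []) ((arr.length : Int) - 1) 0

-- ===== PRECONDITION & SPEC =====
-- Pre_ excludes only the empty list, on which A raises IndexError (new_arr[0]).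
def Pre_ElementMerger (arr : List Int) : Prop := arr ≠ []
instance (arr : List Int) : Decidable (Pre_ElementMerger arr) := by
  unfold Pre_ElementMerger; infer_instance
def pvWitness_ElementMerger : List Int := [5, 2, 9]

def Spec_ElementMerger (arr : List Int) (out : Int) : Prop := out = ElementMerger_alt arr
instance (arr : List Int) (out : Int) : Decidable (Spec_ElementMerger arr out) := by
  unfold Spec_ElementMerger; infer_instance

-- ===== CLAIM (what is proved, stated in full; the proofs are below) =====
def Claim_equal_ElementMerger : Prop :=
  ∀ (arr : List Int), Dom_ElementMerger arr → Pre_ElementMerger arr →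
    Spec_ElementMerger arr (ElementMerger arr)

-- ===== LEMMAS AND PROOFS =====

-- the mathematical one-level reduction: adjacent absolute differences
def dstep (xs : List Int) : List Int := List.zipWith (fun a b => |b - a|) xs xs.tail

def dIter : Nat → List Int → List Int
  | 0, xs => xs
  | a + 1, xs => dIter a (dstep xs)

-- the value of the difference triangle at depth d, position i
def bval (xs : List Int) : Nat → Nat → Int
  | 0, i => xs.getD i 0
  | d + 1, i => |bval xs d (i + 1) - bval xs d i|

theorem getElem_dstep (xs : List Int) (j : Nat) (h : j + 1 < xs.length)
    (h' : j < (dstep xs).length) :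
    (dstep xs)[j] = |xs[j + 1] - xs[j]| := by
  simp [dstep, List.getElem_tail]

theorem length_dstep (xs : List Int) : (dstep xs).length = xs.length - 1 := by
  simp [dstep]

-- A's inner for-loop computes exactly one dstep level
theorem stepA_eq_dstep (xs : List Int) : pvStepA xs = dstep xs := by
  unfold pvStepA
  rw [PySem.List.foldl_append_singleton_eq_map]
  apply List.ext_getElem
  · simp [PySem.List.length_pyRange_one, dstep]
  · intro j hj hj'
    have hjlen : j + 1 < xs.length := by
      simp [PySem.List.length_pyRange_one] at hj; omega
    simp only [List.nil_append, List.getElem_map, PySem.List.getElem_pyRange_one,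
      getElem_dstep xs j hjlen hj']
    have e1 : (1 : Int) + (j : Int) = ((j + 1 : Nat) : Int) := by push_cast; ring
    have e2 : ((j + 1 : Nat) : Int) - 1 = ((j : Nat) : Int) := by push_cast; ring
    rw [e1, PySem.List.pyGetD_natCast, List.getD_eq_getElem xs 0 hjlen]
    rw [e2, PySem.List.pyGetD_natCast, List.getD_eq_getElem xs 0 (by omega)]

-- A's while loop is the full iterated reduction
theorem loopA_eq (n : Nat) (xs : List Int) (hn : xs.length = n) (h1 : 1 ≤ n) :
    pvLoopA xs = dIter (n - 1) xs := by
  induction n using Nat.strong_induction_on generalizing xs with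
  | _ n ih =>
    rw [pvLoopA]
    by_cases hc : 1 < xs.length
    · rw [if_pos hc, stepA_eq_dstep]
      have hlen : (dstep xs).length = n - 1 := by simp [dstep]; omega
      rw [ih (n - 1) (by omega) _ hlen (by omega)]
      have e : n - 1 = (n - 1 - 1) + 1 := by omega
      rw [e]
      simp [dIter]
    · rw [if_neg hc]
      have e : n - 1 = 0 := by omega
      rw [e]
      rfl

theorem dIter_dstep (d : Nat) (xs : List Int) :
    dIter d (dstep xs) = dstep (dIter d xs) := by
  induction d generalizing xs with
  | zero => rfl
  | succ a ih => show dIter a (dstep (dstep xs)) = _; rw [ih (dstep xs)]; rfl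

theorem length_dIter (d : Nat) (xs : List Int) :
    (dIter d xs).length = xs.length - d := by
  induction d generalizing xs with
  | zero => rfl
  | succ a ih => show (dIter a (dstep xs)).length = _; rw [ih, length_dstep]; omega

theorem getElem_dIter (d : Nat) (xs : List Int) (i : Nat) (h : i + d < xs.length)
    (h' : i < (dIter d xs).length) :
    (dIter d xs)[i] = bval xs d i := by
  induction d generalizing i with
  | zero =>
    simp only [dIter, bval]
    exact (List.getD_eq_getElem xs 0 (by simpa [dIter] using h')).symm
  | succ a ih =>
    have hrw : dIter (a + 1) xs = dstep (dIter a xs) := dIter_dstep a xs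
    have hlen : (dIter a xs).length = xs.length - a := length_dIter a xs
    have h1 : i + 1 < (dIter a xs).length := by omega
    have h1' : i + 1 + a < xs.length := by omega
    have h0' : i + a < xs.length := by omega
    simp only [hrw] at h' ⊢
    rw [getElem_dstep _ i h1 h', ih (i + 1) h1' h1, ih i h0' (by omega)]
    rfl

-- B's column update, as structural recursion: new[0] = x, new[d] = |col[d-1] - new[d-1]|
def colStep (x : Int) : List Int → List Int
  | [] => [x]
  | c :: cs => x :: colStep (|c - x|) cs

-- the column of the difference triangle at position 0, built right to left
def diag : List Int → List Int
  | [] => []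
  | x :: t => colStep x (diag t)

theorem length_colStep (x : Int) (c : List Int) :
    (colStep x c).length = c.length + 1 := by
  induction c generalizing x with
  | nil => rfl
  | cons y cs ih => simp [colStep, ih]

theorem colStep_get_zero (x : Int) (c : List Int) (h : 0 < (colStep x c).length) :
    (colStep x c)[0] = x := by
  cases c <;> simp [colStep]

theorem colStep_get_succ (ys : List Int) (x : Int) (d : Nat) (h : d < ys.length)
    (h1 : d + 1 < (colStep x ys).length) (h2 : d < (colStep x ys).length) :
    (colStep x ys)[d + 1] = |ys[d] - (colStep x ys)[d]| := by
  induction ys generalizing x d with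
  | nil => simp at h
  | cons y cs ih =>
    cases d with
    | zero =>
      simp only [colStep, List.getElem_cons_succ, List.getElem_cons_zero]
      exact colStep_get_zero ( |y - x| ) cs (by rw [length_colStep]; omega)
    | succ n =>
      simp only [colStep, List.getElem_cons_succ]
      have hlen : n < cs.length := by simp at h; omega
      exact ih ( |y - x| ) n hlen (by rw [length_colStep]; omega)
        (by rw [length_colStep]; omega)

theorem colStep_take_one (x : Int) (c : List Int) :
    (colStep x c).take 1 = [x] := by
  cases c <;> simp [colStep]

-- B's inner for-loop builds exactly colStep x col (via its prefixes)
theorem inner_fold (col : List Int) (x : Int) (k : Nat) (hk : k ≤ col.length) :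
    (PySem.List.pyRange 1 ((k : Int) + 1) 1).foldl
      (fun new d =>
        new ++ [|PySem.List.pyGetD col (d - 1) 0 - PySem.List.pyGetD new (d - 1) 0|])
      [x]
    = (colStep x col).take (k + 1) := by
  induction k with
  | zero =>
    simp only [Nat.cast_zero, zero_add]
    rw [PySem.List.pyRange_one_eq_nil (le_refl (1 : Int))]
    simp [colStep_take_one]
  | succ n ih =>
    have hn : n ≤ col.length := by omega
    have ec : ((n + 1 : Nat) : Int) + 1 = ((n : Int) + 1) + 1 := by omega
    rw [ec, PySem.List.pyRange_one_succ_right (by omega : (1 : Int) ≤ (n : Int) + 1),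
        List.foldl_append, ih hn]
    simp only [List.foldl_cons, List.foldl_nil]
    have e2 : (n : Int) + 1 - 1 = ((n : Nat) : Int) := by ring
    have hC : (colStep x col).length = col.length + 1 := length_colStep x col
    have hTlen : ((colStep x col).take (n + 1)).length = n + 1 := by simp; omega
    have hcol : PySem.List.pyGetD col ((n : Int) + 1 - 1) 0 = col[n]'(by omega) := by
      rw [e2, PySem.List.pyGetD_natCast, List.getD_eq_getElem col 0 (by omega)]
    have hnew : PySem.List.pyGetD ((colStep x col).take (n + 1)) ((n : Int) + 1 - 1) 0
        = (colStep x col)[n]'(by omega) := by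
      rw [e2, PySem.List.pyGetD_natCast, List.getD_eq_getElem _ 0 (by omega)]
      simp [List.getElem_take]
    rw [hcol, hnew, ← colStep_get_succ col x n (by omega) (by omega) (by omega)]
    conv_rhs => rw [List.take_add_one]
    rw [List.getElem?_eq_getElem (by omega : n + 1 < (colStep x col).length)]
    simp

theorem inner_eq_colStep (col : List Int) (x : Int) :
    (PySem.List.pyRange 1 ((col.length : Int) + 1) 1).foldl
      (fun new d =>
        new ++ [|PySem.List.pyGetD col (d - 1) 0 - PySem.List.pyGetD new (d - 1) 0|])
      [x]
    = colStep x col := by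
  rw [inner_fold col x col.length le_rfl]
  exact List.take_of_length_le (by rw [length_colStep])

-- B's outer loop builds diag arr
theorem outer_eq_diag (arr : List Int) :
    arr.reverse.foldl
      (fun col x =>
        (PySem.List.pyRange 1 ((col.length : Int) + 1) 1).foldl
          (fun new d =>
            new ++ [|PySem.List.pyGetD col (d - 1) 0 - PySem.List.pyGetD new (d - 1) 0|])
          [x])
      []
    = diag arr := by
  rw [List.foldl_reverse]
  induction arr with
  | nil => rfl
  | cons x t ih =>
    rw [List.foldr_cons, ih]
    exact inner_eq_colStep (diag t) x

theorem length_diag (xs : List Int) : (diag xs).length = xs.length := by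
  induction xs with
  | nil => rfl
  | cons x t ih => simp [diag, length_colStep, ih]

theorem bval_cons (x : Int) (t : List Int) (d i : Nat) :
    bval (x :: t) d (i + 1) = bval t d i := by
  induction d generalizing i with
  | zero => simp [bval]
  | succ a ih =>
    show |bval (x :: t) a (i + 1 + 1) - bval (x :: t) a (i + 1)| = _
    rw [ih (i + 1), ih i]
    rfl

theorem diag_get (d : Nat) : ∀ (xs : List Int) (h : d < xs.length)
    (h' : d < (diag xs).length), (diag xs)[d] = bval xs d 0 := by
  induction d with
  | zero =>
    intro xs h h'
    cases xs with
    | nil => simp at h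
    | cons x t =>
      exact (colStep_get_zero x (diag t) (by simpa [diag] using h')).trans (by simp [bval])
  | succ a ih =>
    intro xs h h'
    cases xs with
    | nil => simp at h
    | cons x t =>
      have hdt : (diag t).length = t.length := length_diag t
      have hat : a < t.length := by simp at h; omega
      have key := colStep_get_succ (diag t) x a (by omega) (by rw [length_colStep]; omega)
            (by rw [length_colStep]; omega)
      have h1 : (diag t)[a]'(by omega) = bval t a 0 := ih t hat (by omega)
      have h2 : (diag (x :: t))[a]'(by rw [length_diag]; simp; omega) = bval (x :: t) a 0 :=
        ih (x :: t) (by simp; omega) (by rw [length_diag]; simp; omega)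
      have h3 : |(diag t)[a]'(by omega) - (colStep x (diag t))[a]'(by rw [length_colStep]; omega)|
          = bval (x :: t) (a + 1) 0 := by
        rw [h1]
        rw [show (colStep x (diag t))[a]'(by rw [length_colStep]; omega)
              = bval (x :: t) a 0 from h2]
        show _ = |bval (x :: t) a (0 + 1) - bval (x :: t) a 0|
        rw [bval_cons]
      exact key.trans h3

-- ===== VERDICT (by name: the statement is the Claim_ definition above) =====
theorem ElementMerger_spec : Claim_equal_ElementMerger := by
  intro arr _ hpre
  unfold Spec_ElementMerger ElementMerger ElementMerger_alt
  have hn : 1 ≤ arr.length := by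
    cases arr with
    | nil => exact absurd rfl hpre
    | cons x xs => simp
  rw [outer_eq_diag, loopA_eq arr.length arr rfl hn]
  have hAlen : (dIter (arr.length - 1) arr).length = 1 := by
    rw [length_dIter]; omega
  have hA : PySem.List.pyGetD (dIter (arr.length - 1) arr) 0 0
      = bval arr (arr.length - 1) 0 := by
    have hg := getElem_dIter (arr.length - 1) arr 0 (by omega) (by omega)
    rcases List.length_eq_one_iff.mp hAlen with ⟨v, hv⟩
    have hv0 : (dIter (arr.length - 1) arr)[0]'(by omega) = v := by simp [hv]
    have hvb : v = bval arr (arr.length - 1) 0 := hv0.symm.trans hg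
    conv_lhs => rw [hv]
    simpa [PySem.List.pyGetD_zero] using hvb
  have hcast : (arr.length : Int) - 1 = ((arr.length - 1 : Nat) : Int) := by omega
  have hB : PySem.List.pyGetD (diag arr) ((arr.length : Int) - 1) 0
      = bval arr (arr.length - 1) 0 := by
    rw [hcast, PySem.List.pyGetD_natCast,
        List.getD_eq_getElem _ 0 (by rw [length_diag]; omega)]
    exact diag_get (arr.length - 1) arr (by omega) (by rw [length_diag]; omega)
  rw [hA, hB]
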